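-- pv_equiv track=rewrite | github.com/TaDpoleO/Python-Education | Yandex/Algorithm Training/Algorithm Training 5/Contest 3/C.py | answer
-- ===== SOURCE A (Python) =====
-- from collections import Counter
--
-- def answer(numbers, N):
--     num_counter = Counter(numbers)
--     min_del = N
--
--     for key in num_counter:
--         if key+1 in num_counter:
--             if (cur_del := N-num_counter[key]-num_counter[key+1]) < min_del:
--                 min_del = cur_del
--
--     if min_del == N:
--         for key in num_counter:
--             if (cur_del := N-num_counter[key]) < min_del:
--                 min_del = cur_del
--
--     return min_del
-- ===== SOURCE B (Python) =====
-- def answer(numbers, N):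
--     s = sorted(numbers)
--     # run-length encode the sorted list: (value, count) groups in increasing value order
--     groups = []
--     for v in s:
--         if groups and groups[-1][0] == v:
--             groups[-1] = (v, groups[-1][1] + 1)
--         else:
--             groups.append((v, 1))
--     best_pair = 0
--     for (v1, c1), (v2, c2) in zip(groups, groups[1:]):
--         if v2 == v1 + 1:
--             best_pair = max(best_pair, c1 + c2)
--     if best_pair > 0:
--         return N - best_pair
--     best_single = 0
--     for _, c in groups:
--         best_single = max(best_single, c)
--     return N - best_single
-- ===== Notes on version B (the rewrite author's own statement) =====
-- stated objective: alternative
-- what changed: Replaces the Counter hash-table with sort + run-length grouping: a scan over adjacent (value,count) groups finds the best consecutive pair (strict ordering makes k and k+1 adjacent), falling back to the largest single group only when no pair exists.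
import Mathlib
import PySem

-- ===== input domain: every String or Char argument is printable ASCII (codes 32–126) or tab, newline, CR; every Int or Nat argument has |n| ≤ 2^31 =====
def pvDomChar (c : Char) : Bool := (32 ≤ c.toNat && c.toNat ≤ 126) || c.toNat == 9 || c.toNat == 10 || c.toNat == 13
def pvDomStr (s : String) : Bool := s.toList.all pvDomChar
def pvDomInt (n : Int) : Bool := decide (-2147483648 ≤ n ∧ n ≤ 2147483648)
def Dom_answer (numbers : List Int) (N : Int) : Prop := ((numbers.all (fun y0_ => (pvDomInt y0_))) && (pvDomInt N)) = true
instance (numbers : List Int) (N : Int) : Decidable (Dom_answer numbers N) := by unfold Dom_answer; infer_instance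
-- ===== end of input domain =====

-- B replaces A's Counter hash-table scans with sort + run-length grouping and an adjacent-group
-- scan (alternative decomposition; return values proved equal on all inputs).

-- ===== PORT A =====
def answer (numbers : List Int) (N : Int) : Int :=
  let c := PySem.Dict.counter numbers
  let minDel := c.keys.foldl (fun minDel key =>
    if c.contains (key + 1) then
      let curDel := N - c.getD key 0 - c.getD (key + 1) 0
      if curDel < minDel then curDel else minDel
    else minDel) N
  if minDel == N then
    c.keys.foldl (fun minDel key =>
      let curDel := N - c.getD key 0
      if curDel < minDel then curDel else minDel) minDel
  else minDel

-- ===== PORT B =====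
-- one step of Source B's grouping loop: merge v into the last group or append a new (v, 1) group
def groupStep (gs : List (Int × Int)) (v : Int) : List (Int × Int) :=
  match gs.getLast? with
  | some (w, c) => if w == v then gs.dropLast ++ [(v, c + 1)] else gs ++ [(v, 1)]
  | none => [(v, 1)]

def answer_alt (numbers : List Int) (N : Int) : Int :=
  let groups := (PySem.List.sorted numbers (fun x => x) false).foldl groupStep []
  let bestPair := (groups.zip groups.tail).foldl
    (fun bestPair p => if p.2.1 == p.1.1 + 1 then max bestPair (p.1.2 + p.2.2) else bestPair) 0
  if bestPair > 0 then N - bestPair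
  else N - groups.foldl (fun bestSingle p => max bestSingle p.2) 0

-- ===== PRECONDITION & SPEC =====
def Spec_answer (numbers : List Int) (N : Int) (out : Int) : Prop := out = answer_alt numbers N
instance (numbers : List Int) (N : Int) (out : Int) : Decidable (Spec_answer numbers N out) := by unfold Spec_answer; infer_instance

-- ===== CLAIM (what is proved, stated in full; the proofs are below) =====
def Claim_equal_answer : Prop := ∀ (numbers : List Int) (N : Int), Dom_answer numbers N → Spec_answer numbers N (answer numbers N)

-- ===== LEMMAS AND PROOFS =====

-- A's filtered min-update loop computes N minus a filtered max-update loop.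
theorem foldl_min_eq_sub_max (p : Int → Bool) (g1 g2 : Int → Int) (N : Int) :
    ∀ (S : List Int) (a : Int),
    S.foldl (fun m k => if p k then
        (if N - g1 k - g2 k < m then N - g1 k - g2 k else m) else m) (N - a)
      = N - S.foldl (fun b k => if p k then max b (g1 k + g2 k) else b) a := by
  intro S
  induction S with
  | nil => intro a; rfl
  | cons k S ih =>
    intro a
    simp only [List.foldl_cons]
    by_cases hp : p k = true
    · rw [if_pos hp, if_pos hp]
      have h1 : (if N - g1 k - g2 k < N - a then N - g1 k - g2 k else N - a)
          = N - max a (g1 k + g2 k) := by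
        split_ifs <;> omega
      rw [h1, ih (max a (g1 k + g2 k))]
    · rw [if_neg hp, if_neg hp, ih a]

-- the unfiltered variant (A's second loop)
theorem foldl_min_eq_sub_max' (g : Int → Int) (N : Int) :
    ∀ (S : List Int) (a : Int),
    S.foldl (fun m k => if N - g k < m then N - g k else m) (N - a)
      = N - S.foldl (fun b k => max b (g k)) a := by
  intro S
  induction S with
  | nil => intro a; rfl
  | cons k S ih =>
    intro a
    simp only [List.foldl_cons]
    have h1 : (if N - g k < N - a then N - g k else N - a) = N - max a (g k) := by
      split_ifs <;> omega
    rw [h1, ih (max a (g k))]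

theorem le_foldl_max (p : Int → Bool) (g : Int → Int) :
    ∀ (S : List Int) (a : Int), a ≤ S.foldl (fun b k => if p k then max b (g k) else b) a := by
  intro S
  induction S with
  | nil => intro a; exact le_refl a
  | cons k S ih =>
    intro a
    simp only [List.foldl_cons]
    by_cases hp : p k = true
    · rw [if_pos hp]; exact le_trans (le_max_left a (g k)) (ih _)
    · rw [if_neg hp]; exact ih a

-- structure of Source B's grouping of a sorted list: strictly increasing values, exact counts
theorem grp_spec : ∀ (s : List Int), s.Pairwise (· ≤ ·) →
    ((s.foldl groupStep []).map Prod.fst).Pairwise (· < ·)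
  ∧ (∀ x : Int, x ∈ (s.foldl groupStep []).map Prod.fst ↔ x ∈ s)
  ∧ (∀ q ∈ s.foldl groupStep [], q.2 = (s.count q.1 : Int)) := by
  intro s
  induction s using List.reverseRecOn with
  | nil => intro _; exact ⟨by simp, by simp, by simp⟩
  | append_singleton s₀ v ih =>
    intro h
    obtain ⟨h₀, -, hle⟩ := List.pairwise_append.mp h
    have hle' : ∀ x ∈ s₀, x ≤ v := fun x hx => hle x hx v (by simp)
    obtain ⟨ihpw, ihmem, ihcnt⟩ := ih h₀
    rw [List.foldl_append, List.foldl_cons, List.foldl_nil]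
    rcases List.eq_nil_or_concat (s₀.foldl groupStep []) with hG | ⟨gs₀, q, hG⟩
    · -- empty accumulator: s₀ has no members
      have hs₀ : s₀ = [] := by
        rw [List.eq_nil_iff_forall_not_mem]
        intro x hx
        have := (ihmem x).mpr hx
        rw [hG] at this
        simp at this
      subst hs₀
      rw [hG]
      refine ⟨by simp [groupStep], by simp [groupStep], by simp [groupStep]⟩
    · obtain ⟨w, c⟩ := q
      rw [List.concat_eq_append] at hG
      rw [hG] at ihpw ihmem ihcnt ⊢
      have hfst : (gs₀ ++ [(w, c)]).map Prod.fst = gs₀.map Prod.fst ++ [w] := by simp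
      rw [hfst] at ihpw ihmem
      have hwlast : ∀ x ∈ gs₀.map Prod.fst, x < w :=
        fun x hx => (List.pairwise_append.mp ihpw).2.2 x hx w (by simp)
      have hwmem : w ∈ s₀ := (ihmem w).mp (by simp)
      have hwv : w ≤ v := hle' w hwmem
      have hstep : groupStep (gs₀ ++ [(w, c)]) v =
          if w == v then gs₀ ++ [(v, c + 1)] else (gs₀ ++ [(w, c)]) ++ [(v, 1)] := by
        simp only [groupStep, List.getLast?_concat, List.dropLast_concat]
      by_cases hwv' : w = v
      · -- merge with the last group
        subst hwv'
        rw [hstep, if_pos (by simp)]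
        refine ⟨?_, ?_, ?_⟩
        · simp only [List.map_append, List.map_cons, List.map_nil]
          exact List.pairwise_append.mpr ⟨(List.pairwise_append.mp ihpw).1, by simp,
            fun x hx y hy => by simp at hy; subst hy; exact hwlast x hx⟩
        · intro x
          have h2 := ihmem x
          simp only [List.map_append, List.map_cons, List.map_nil, List.mem_append,
            List.mem_singleton] at h2 ⊢
          tauto
        · intro q hq
          rcases List.mem_append.mp hq with hq | hq
          · have h1 : q.2 = (s₀.count q.1 : Int) := ihcnt q (by simp [hq])
            have h2 : q.1 < w := hwlast q.1 (List.mem_map_of_mem hq)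
            rw [List.count_append, h1]
            simp [List.count_singleton]
            omega
          · simp only [List.mem_singleton] at hq
            subst hq
            have h1 : c = (s₀.count w : Int) := ihcnt (w, c) (by simp)
            rw [List.count_append, h1]
            simp
      · -- start a new group
        have hwv2 : w < v := lt_of_le_of_ne hwv hwv'
        have hvnot : v ∉ s₀ := by
          intro hv
          have := (ihmem v).mpr hv
          simp only [List.mem_append, List.mem_singleton] at this
          rcases this with h1 | h1
          · have := hwlast v h1; omega
          · omega
        rw [hstep, if_neg (by simp [hwv'])]
        refine ⟨?_, ?_, ?_⟩
        · simp only [List.map_append, List.map_cons, List.map_nil]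
          refine List.pairwise_append.mpr ⟨by rw [← hfst] at ihpw ⊢; simpa using ihpw, by simp, ?_⟩
          intro x hx y hy
          simp only [List.mem_singleton] at hy
          subst hy
          rcases List.mem_append.mp hx with h1 | h1
          · exact lt_trans (hwlast x h1) hwv2
          · simp only [List.mem_singleton] at h1; omega
        · intro x
          have h2 := ihmem x
          simp only [List.map_append, List.map_cons, List.map_nil, List.mem_append,
            List.mem_singleton] at h2 ⊢
          tauto
        · intro q hq
          rcases List.mem_append.mp hq with hq | hq
          · have h1 : q.2 = (s₀.count q.1 : Int) := ihcnt q hq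
            have h2 : q.1 < v := by
              have : q.1 ∈ gs₀.map Prod.fst ++ [w] := by
                rw [← hfst]; exact List.mem_map_of_mem hq
              rcases List.mem_append.mp this with h3 | h3
              · exact lt_trans (hwlast q.1 h3) hwv2
              · simp only [List.mem_singleton] at h3; omega
            rw [List.count_append, h1]
            simp [List.count_singleton]
            omega
          · simp only [List.mem_singleton] at hq
            subst hq
            rw [List.count_append]
            simp [List.count_eq_zero_of_not_mem hvnot]

-- B's adjacent-pair scan over strictly increasing groups equals A's filtered max loop:
-- k and k+1 both occur iff their groups are adjacent.
theorem zipfold_eq (cnt : Int → Int) (S0 : List Int) :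
    ∀ (gs : List (Int × Int)) (b : Int),
    (gs.map Prod.fst).Pairwise (· < ·) →
    (∀ q ∈ gs, q.2 = cnt q.1) →
    (∀ k ∈ gs.map Prod.fst, (S0.contains (k + 1) = true ↔ (k + 1) ∈ gs.map Prod.fst)) →
    (gs.zip gs.tail).foldl
        (fun b p => if p.2.1 == p.1.1 + 1 then max b (p.1.2 + p.2.2) else b) b
      = (gs.map Prod.fst).foldl
        (fun b k => if S0.contains (k + 1) then max b (cnt k + cnt (k + 1)) else b) b := by
  intro gs
  induction gs with
  | nil => intro b _ _ _; rfl
  | cons p1 tl ih =>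
    intro b hpw hcnt hS0
    cases tl with
    | nil =>
      simp only [List.tail_cons, List.zip_nil_right, List.foldl_nil, List.map_cons, List.map_nil,
        List.foldl_cons]
      cases hcon : S0.contains (p1.1 + 1) with
      | true =>
        exfalso
        have := (hS0 p1.1 (by simp)).mp hcon
        simp at this
      | false => simp
    | cons p2 rest =>
      simp only [List.map_cons] at hpw
      have hpw' : ((p2 :: rest).map Prod.fst).Pairwise (· < ·) := by
        simp only [List.map_cons]
        exact (List.pairwise_cons.mp hpw).2
      have hlt : ∀ x ∈ (p2 :: rest).map Prod.fst, p1.1 < x := by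
        simpa using (List.pairwise_cons.mp hpw).1
      have hp12 : p1.1 < p2.1 := hlt p2.1 (by simp)
      have hmemiff : S0.contains (p1.1 + 1) = true ↔ p2.1 = p1.1 + 1 := by
        rw [hS0 p1.1 (by simp)]
        simp only [List.map_cons, List.mem_cons]
        constructor
        · rintro (h1 | h1 | h1)
          · omega
          · omega
          · exfalso
            have h2 := (List.pairwise_cons.mp hpw').1 (p1.1 + 1) (by simpa using h1)
            have h3 := hlt (p1.1 + 1) (by simp only [List.map_cons, List.mem_cons]; tauto)
            omega
        · intro h1; exact Or.inr (Or.inl h1.symm)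
      have step : (if p2.1 == p1.1 + 1 then max b (p1.2 + p2.2) else b)
          = (if S0.contains (p1.1 + 1) then max b (cnt p1.1 + cnt (p1.1 + 1)) else b) := by
        by_cases h2 : p2.1 = p1.1 + 1
        · rw [if_pos (by simp [h2]), if_pos (hmemiff.mpr h2)]
          have e1 : p1.2 = cnt p1.1 := hcnt p1 (by simp)
          have e2 : p2.2 = cnt p2.1 := hcnt p2 (by simp)
          rw [e1, e2, h2]
        · rw [if_neg (by simp [h2]),
              if_neg (by
                intro hc
                exact h2 (hmemiff.mp hc))]
      have hS0' : ∀ k ∈ (p2 :: rest).map Prod.fst,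
          (S0.contains (k + 1) = true ↔ (k + 1) ∈ (p2 :: rest).map Prod.fst) := by
        intro k hk
        have hk0 : k ∈ (p1 :: p2 :: rest).map Prod.fst := by
          simp only [List.map_cons, List.mem_cons] at hk ⊢
          tauto
        rw [hS0 k hk0]
        have hk' : p1.1 < k := hlt k hk
        simp only [List.map_cons, List.mem_cons] at *
        constructor
        · rintro (h1 | h1)
          · omega
          · exact h1
        · intro h1; tauto
      calc ((p1 :: p2 :: rest).zip ((p1 :: p2 :: rest).tail)).foldl
              (fun b p => if p.2.1 == p.1.1 + 1 then max b (p.1.2 + p.2.2) else b) b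
          = ((p2 :: rest).zip ((p2 :: rest).tail)).foldl
              (fun b p => if p.2.1 == p.1.1 + 1 then max b (p.1.2 + p.2.2) else b)
              (if p2.1 == p1.1 + 1 then max b (p1.2 + p2.2) else b) := by
            simp [List.zip_cons_cons]
        _ = ((p2 :: rest).map Prod.fst).foldl
              (fun b k => if S0.contains (k + 1) then max b (cnt k + cnt (k + 1)) else b)
              (if S0.contains (p1.1 + 1) then max b (cnt p1.1 + cnt (p1.1 + 1)) else b) := by
            rw [step]
            exact ih _ hpw' (fun q hq => hcnt q (by simp [hq])) hS0'
        _ = ((p1 :: p2 :: rest).map Prod.fst).foldl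
              (fun b k => if S0.contains (k + 1) then max b (cnt k + cnt (k + 1)) else b) b := by
            simp

theorem singles_fold_eq (cnt : Int → Int) :
    ∀ (gs : List (Int × Int)) (b : Int), (∀ q ∈ gs, q.2 = cnt q.1) →
    gs.foldl (fun b p => max b p.2) b
      = (gs.map Prod.fst).foldl (fun b k => max b (cnt k)) b := by
  intro gs
  induction gs with
  | nil => intro b _; rfl
  | cons q tl ih =>
    intro b h
    simp only [List.foldl_cons, List.map_cons]
    rw [h q (by simp)]
    exact ih _ (fun q hq => h q (by simp [hq]))

-- both max folds are invariant under permutation of the key list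
theorem foldl_ifmax_perm (p : Int → Bool) (g : Int → Int) {S T : List Int}
    (h : S.Perm T) (b : Int) :
    S.foldl (fun b k => if p k then max b (g k) else b) b
      = T.foldl (fun b k => if p k then max b (g k) else b) b := by
  refine List.Perm.foldl_eq (rcomm := ⟨fun b k1 k2 => ?_⟩) h b
  by_cases h1 : p k1 = true <;> by_cases h2 : p k2 = true <;> simp [h1, h2, max_right_comm]

theorem foldl_max_perm (g : Int → Int) {S T : List Int} (h : S.Perm T) (b : Int) :
    S.foldl (fun b k => max b (g k)) b = T.foldl (fun b k => max b (g k)) b := by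
  refine List.Perm.foldl_eq (rcomm := ⟨fun b k1 k2 => ?_⟩) h b
  simp [max_right_comm]

-- ===== VERDICT (by name: the statement is the Claim_ definition above) =====
theorem answer_spec : Claim_equal_answer := by
  intro numbers N _
  unfold Spec_answer answer answer_alt
  simp only [PySem.Dict.keys_counter, PySem.Dict.contains_counter, PySem.Dict.getD_counter]
  have hperm : (PySem.List.sorted numbers (fun x => x) false).Perm numbers :=
    PySem.List.sorted_perm numbers (fun x => x) false
  have hsort : (PySem.List.sorted numbers (fun x => x) false).Pairwise (· ≤ ·) :=
    PySem.List.sorted_pairwise numbers (fun x => x)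
  obtain ⟨hpw, hmem, hcnt⟩ := grp_spec _ hsort
  have hcnt' : ∀ q ∈ (PySem.List.sorted numbers (fun x => x) false).foldl groupStep [],
      q.2 = ((fun k => (List.count k numbers : Int)) q.1) := by
    intro q hq
    rw [hcnt q hq]
    simp [hperm.count_eq]
  have hS0 : ∀ k ∈ ((PySem.List.sorted numbers (fun x => x) false).foldl groupStep []).map Prod.fst,
      (numbers.contains (k + 1) = true
        ↔ (k + 1) ∈ ((PySem.List.sorted numbers (fun x => x) false).foldl groupStep []).map Prod.fst) := by
    intro k _
    rw [List.contains_iff_mem, ← hperm.mem_iff, ← hmem]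
  have hnodupB : (((PySem.List.sorted numbers (fun x => x) false).foldl groupStep []).map Prod.fst).Nodup :=
    hpw.imp (fun h => ne_of_lt h)
  have hpermAB : (PySem.Set.ofList numbers).Perm
      (((PySem.List.sorted numbers (fun x => x) false).foldl groupStep []).map Prod.fst) :=
    (List.perm_ext_iff_of_nodup (PySem.Set.nodup_ofList numbers) hnodupB).mpr
      (fun x => by rw [PySem.Set.mem_ofList, ← hperm.mem_iff, ← hmem])
  -- A's first loop, as N minus a max fold
  have hA1 :
      List.foldl (fun minDel key =>
          if numbers.contains (key + 1) = true then
            if N - (List.count key numbers : Int) - (List.count (key + 1) numbers : Int) < minDel then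
              N - (List.count key numbers : Int) - (List.count (key + 1) numbers : Int)
            else minDel
          else minDel) N (PySem.Set.ofList numbers)
        = N - List.foldl (fun b k =>
            if numbers.contains (k + 1) = true then
              max b ((List.count k numbers : Int) + (List.count (k + 1) numbers : Int)) else b) 0
            (PySem.Set.ofList numbers) := by
    have h := foldl_min_eq_sub_max (fun k => numbers.contains (k + 1))
      (fun k => (List.count k numbers : Int)) (fun k => (List.count (k + 1) numbers : Int))
      N (PySem.Set.ofList numbers) 0
    rw [sub_zero] at h
    exact h
  -- A's second loop, as N minus a max fold
  have hA2 : ∀ m, m = N →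
      List.foldl (fun minDel key =>
          if N - (List.count key numbers : Int) < minDel
            then N - (List.count key numbers : Int) else minDel) m (PySem.Set.ofList numbers)
        = N - List.foldl (fun b k => max b ((List.count k numbers : Int))) 0
            (PySem.Set.ofList numbers) := by
    intro m hm; rw [hm]
    have h := foldl_min_eq_sub_max' (fun k => (List.count k numbers : Int)) N
      (PySem.Set.ofList numbers) 0
    rw [sub_zero] at h
    exact h
  -- B's pair scan equals A's filtered max fold (over the counter's key set)
  have hB1 :
      (((PySem.List.sorted numbers (fun x => x) false).foldl groupStep []).zip
          ((PySem.List.sorted numbers (fun x => x) false).foldl groupStep []).tail).foldl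
        (fun bestPair p => if (p.2.1 == p.1.1 + 1) = true
          then max bestPair (p.1.2 + p.2.2) else bestPair) 0
        = List.foldl (fun b k =>
            if numbers.contains (k + 1) = true then
              max b ((List.count k numbers : Int) + (List.count (k + 1) numbers : Int)) else b) 0
            (PySem.Set.ofList numbers) := by
    rw [zipfold_eq (fun k => (List.count k numbers : Int)) numbers
      ((PySem.List.sorted numbers (fun x => x) false).foldl groupStep []) 0 hpw hcnt' hS0]
    exact (foldl_ifmax_perm (fun k => numbers.contains (k + 1))
      (fun k => (List.count k numbers : Int) + (List.count (k + 1) numbers : Int)) hpermAB 0).symm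
  -- B's singles fold equals A's unfiltered max fold
  have hB2 :
      ((PySem.List.sorted numbers (fun x => x) false).foldl groupStep []).foldl
        (fun bestSingle p => max bestSingle p.2) 0
        = List.foldl (fun b k => max b ((List.count k numbers : Int))) 0
            (PySem.Set.ofList numbers) := by
    rw [singles_fold_eq (fun k => (List.count k numbers : Int)) _ 0 hcnt']
    exact (foldl_max_perm (fun k => (List.count k numbers : Int)) hpermAB 0).symm
  rw [hA1, hB1, hB2]
  have hM0 : (0 : Int) ≤ List.foldl (fun b k =>
      if numbers.contains (k + 1) = true then
        max b ((List.count k numbers : Int) + (List.count (k + 1) numbers : Int)) else b) 0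
      (PySem.Set.ofList numbers) :=
    le_foldl_max (fun k => numbers.contains (k + 1))
      (fun k => (List.count k numbers : Int) + (List.count (k + 1) numbers : Int))
      (PySem.Set.ofList numbers) 0
  by_cases hz : List.foldl (fun b k =>
      if numbers.contains (k + 1) = true then
        max b ((List.count k numbers : Int) + (List.count (k + 1) numbers : Int)) else b) 0
      (PySem.Set.ofList numbers) = 0
  · rw [if_pos (by rw [hz]; simp), hA2 _ (by omega), if_neg (by omega)]
  · rw [if_neg (by simp only [beq_iff_eq]; omega), if_pos (by omega)]
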